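-- pv_equiv track=rewrite | github.com/MdAbedin/binarysearch | 0288 Remove One Letter.py | solve
-- ===== SOURCE A (Python) =====
-- def solve(s0, s1):
--     if len(s0) != len(s1)+1: return False
--
--     for i in range(len(s1)):
--         if s1[i] != s0[i]:
--             if s0[i+1:] == s1[i:]:
--                 return True
--             break
--
--     return s0.startswith(s1)
-- ===== SOURCE B (Python) =====
-- def solve(s0, s1):
--     for i in range(len(s0)):
--         if s0[:i] + s0[i+1:] == s1:
--             return True
--     return False
-- ===== Notes on version B (the rewrite author's own statement) =====
-- stated objective: simpler
-- what changed: Replaces A's single-pass first-mismatch scan (with length guard, suffix comparison and startswith fallback) by a plain brute-force loop that compares every one-char deletion of s0 against s1.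
import Mathlib
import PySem

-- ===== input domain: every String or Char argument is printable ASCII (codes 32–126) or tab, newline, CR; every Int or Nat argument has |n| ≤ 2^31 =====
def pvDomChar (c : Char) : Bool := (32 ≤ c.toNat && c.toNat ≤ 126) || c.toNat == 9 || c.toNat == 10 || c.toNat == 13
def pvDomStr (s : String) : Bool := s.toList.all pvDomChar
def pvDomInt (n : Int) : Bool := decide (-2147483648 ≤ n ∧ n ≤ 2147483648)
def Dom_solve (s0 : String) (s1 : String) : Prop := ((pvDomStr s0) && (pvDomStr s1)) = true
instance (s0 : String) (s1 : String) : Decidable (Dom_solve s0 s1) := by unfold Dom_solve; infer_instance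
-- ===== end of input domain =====

-- B replaces A's single-pass first-mismatch scan by a brute-force loop over all
-- one-character deletions of s0; objective: simpler (no speed claim).

-- ===== PORT A =====
-- the 'for i in range(len(s1))' loop with its early returns and break
def solveLoop (l0 l1 : List Char) (i : Nat) : Bool :=
  if _h : i < l1.length then
    if PySem.List.pyGet? l1 (i : Int) ≠ PySem.List.pyGet? l0 (i : Int) then
      if PySem.List.slice l0 (some ((i : Int) + 1)) none = PySem.List.slice l1 (some (i : Int)) none then
        true
      else
        -- break, then the final 'return s0.startswith(s1)'
        PySem.Chars.startswith l0 l1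
    else solveLoop l0 l1 (i + 1)
  else PySem.Chars.startswith l0 l1
termination_by l1.length - i

def solve (s0 : String) (s1 : String) : Bool :=
  if s0.toList.length ≠ s1.toList.length + 1 then false
  else solveLoop s0.toList s1.toList 0

-- ===== PORT B =====
-- for i in range(len(s0)): if s0[:i] + s0[i+1:] == s1: return True; return False
def solve_alt (s0 : String) (s1 : String) : Bool :=
  (PySem.List.pyRange 0 (s0.toList.length : Int) 1).any (fun i =>
    PySem.List.slice s0.toList none (some i) ++ PySem.List.slice s0.toList (some (i + 1)) none
      == s1.toList)

-- ===== PRECONDITION & SPEC =====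
def Spec_solve (s0 : String) (s1 : String) (out : Bool) : Prop := out = solve_alt s0 s1
instance (s0 : String) (s1 : String) (out : Bool) : Decidable (Spec_solve s0 s1 out) := by unfold Spec_solve; infer_instance

-- ===== CLAIM (what is proved, stated in full; the proofs are below) =====
def Claim_equal_solve : Prop := ∀ (s0 : String) (s1 : String), Dom_solve s0 s1 → Spec_solve s0 s1 (solve s0 s1)

-- ===== LEMMAS AND PROOFS =====

-- recursive form of B's brute-force deletion test
def delB : List Char → List Char → Bool
  | [], _ => false
  | a :: t0, l1 =>
    (t0 == l1) ||
      (match l1 with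
       | [] => false
       | b :: t1 => (a == b) && delB t0 t1)

-- recursive form of A's first-mismatch scan (only meaningful when |l0| = |l1| + 1)
def aRec : List Char → List Char → Bool
  | _, [] => true
  | [], _ :: _ => false
  | a :: t0, b :: t1 => if a = b then aRec t0 t1 else (t0 == b :: t1)

theorem aRec_nil (l : List Char) : aRec l [] = true := by
  cases l <;> rfl

theorem delB_cons_self (b : Char) (t : List Char) : delB (b :: t) t = true := by
  simp [delB]

theorem delB_iff (l0 l1 : List Char) :
    delB l0 l1 = true ↔ ∃ k, k < l0.length ∧ l0.take k ++ l0.drop (k + 1) = l1 := by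
  induction l0 generalizing l1 with
  | nil => simp [delB]
  | cons a t0 ih =>
    cases l1 with
    | nil =>
      simp only [delB, Bool.or_eq_true, beq_iff_eq]
      constructor
      · rintro (h | h)
        · exact ⟨0, by simp, by simpa using h⟩
        · cases h
      · rintro ⟨k, hk, heq⟩
        cases k with
        | zero => left; simpa using heq
        | succ j => simp at heq
    | cons b t1 =>
      simp only [delB, Bool.or_eq_true, Bool.and_eq_true, beq_iff_eq, ih]
      constructor
      · rintro (h | ⟨hab, k, hk, heq⟩)
        · exact ⟨0, by simp, by simpa using h⟩
        · exact ⟨k + 1, by simpa using hk, by simp [hab, heq]⟩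
      · rintro ⟨k, hk, heq⟩
        cases k with
        | zero => left; simpa using heq
        | succ j =>
          right
          simp only [List.take_succ_cons, List.drop_succ_cons, List.cons_append,
            List.cons.injEq] at heq
          exact ⟨heq.1, j, by simpa using hk, heq.2⟩

theorem aRec_eq_delB : ∀ (l1 l0 : List Char), l0.length = l1.length + 1 → aRec l0 l1 = delB l0 l1 := by
  intro l1
  induction l1 with
  | nil =>
    intro l0 hlen
    match l0, hlen with
    | [a], _ => rfl
  | cons b t1 ih =>
    intro l0 hlen
    match l0 with
    | [] => simp at hlen
    | a :: t0 =>
      have hlen' : t0.length = t1.length + 1 := by simpa using hlen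
      by_cases hab : a = b
      · by_cases ht : t0 = b :: t1
        · subst ht
          have h1 : aRec (a :: b :: t1) (b :: t1) = aRec (b :: t1) t1 := by simp [aRec, hab]
          rw [h1, ih (b :: t1) (by simp), delB_cons_self]
          simp [delB]
        · simp [aRec, delB, hab, ht, ih t0 hlen']
      · simp [aRec, delB, hab]

theorem loop_eq (l0 l1 : List Char) (n : Nat) :
    ∀ i, l1.length - i ≤ n → l0.length = l1.length + 1 → l0.take i = l1.take i →
      solveLoop l0 l1 i = aRec (l0.drop i) (l1.drop i) := by
  induction n with
  | zero =>
    intro i hfuel hlen hpre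
    have hi : l1.length ≤ i := by omega
    have hdrop : l1.drop i = [] := by simp [List.drop_eq_nil_iff]; omega
    have htake : l0.take i = l1 := by rw [hpre, List.take_of_length_le hi]
    have hpref : l1 <+: l0 := htake ▸ List.take_prefix i l0
    rw [solveLoop]
    simp only [hdrop, aRec_nil, dif_neg (by omega : ¬ i < l1.length)]
    exact (PySem.Chars.startswith_iff l0 l1).2 hpref
  | succ n ihn =>
    intro i hfuel hlen hpre
    by_cases h : i < l1.length
    · have h0 : i < l0.length := by omega
      have hg1 : PySem.List.pyGet? l1 (i : Int) = some l1[i] := by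
        simp [PySem.List.pyGet?_natCast, List.getElem?_eq_getElem h]
      have hg0 : PySem.List.pyGet? l0 (i : Int) = some l0[i] := by
        simp [PySem.List.pyGet?_natCast, List.getElem?_eq_getElem h0]
      have hd0 : l0.drop i = l0[i] :: l0.drop (i + 1) := (List.getElem_cons_drop h0).symm
      have hd1 : l1.drop i = l1[i] :: l1.drop (i + 1) := (List.getElem_cons_drop h).symm
      rw [solveLoop]
      simp only [dif_pos h, hg1, hg0]
      by_cases heq : l1[i] = l0[i]
      · -- heads equal: loop continues, aRec recurses
        have hpre' : l0.take (i + 1) = l1.take (i + 1) := by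
          rw [List.take_add_one, List.take_add_one, hpre,
            List.getElem?_eq_getElem h0, List.getElem?_eq_getElem h, heq]
        rw [if_neg (by simp [heq])]
        rw [ihn (i + 1) (by omega) hlen hpre', hd0, hd1]
        simp [aRec, heq]
      · -- first mismatch
        rw [if_pos (by simpa using heq)]
        have hsw : PySem.Chars.startswith l0 l1 = false := by
          rw [Bool.eq_false_iff]
          intro hsw
          exact heq (((PySem.Chars.startswith_iff l0 l1).1 hsw).getElem h)
        have hslice0 : PySem.List.slice l0 (some ((i : Int) + 1)) none = l0.drop (i + 1) := by
          have : ((i : Int) + 1) = ((i + 1 : Nat) : Int) := by push_cast; ring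
          rw [this, PySem.List.slice_from_natCast]
        have hslice1 : PySem.List.slice l1 (some (i : Int)) none = l1.drop i := by
          rw [PySem.List.slice_from_natCast]
        rw [hslice0, hslice1, hd0, hd1]
        have hne : ¬ l0[i] = l1[i] := fun hc => heq (Eq.symm hc)
        simp only [aRec, if_neg hne]
        by_cases hrest : l0.drop (i + 1) = l1[i] :: l1.drop (i + 1)
        · simp [hrest]
        · rw [if_neg hrest, hsw]
          symm
          simpa using hrest
    · have hdrop : l1.drop i = [] := by simp [List.drop_eq_nil_iff]; omega
      have htake : l0.take i = l1 := by
        rw [hpre, List.take_of_length_le (by omega)]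
      have hpref : l1 <+: l0 := htake ▸ List.take_prefix i l0
      rw [solveLoop]
      simp only [hdrop, aRec_nil, dif_neg h]
      exact (PySem.Chars.startswith_iff l0 l1).2 hpref

theorem alt_iff (s0 s1 : String) :
    solve_alt s0 s1 = true ↔
      ∃ k, k < s0.toList.length ∧ s0.toList.take k ++ s0.toList.drop (k + 1) = s1.toList := by
  unfold solve_alt
  rw [PySem.List.pyRange_zero_nat, List.any_map, List.any_eq_true]
  constructor
  · rintro ⟨k, hk, hpred⟩
    rw [List.mem_range] at hk
    refine ⟨k, hk, ?_⟩
    simp only [Function.comp] at hpred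
    rw [show ((k : Int) + 1) = ((k + 1 : Nat) : Int) by push_cast; ring,
      PySem.List.slice_to_natCast, PySem.List.slice_from_natCast] at hpred
    simpa using hpred
  · rintro ⟨k, hk, heq⟩
    refine ⟨k, List.mem_range.2 hk, ?_⟩
    simp only [Function.comp]
    rw [show ((k : Int) + 1) = ((k + 1 : Nat) : Int) by push_cast; ring,
      PySem.List.slice_to_natCast, PySem.List.slice_from_natCast]
    simpa using heq

-- ===== VERDICT (by name: the statement is the Claim_ definition above) =====
theorem solve_spec : Claim_equal_solve := by
  intro s0 s1 _dom
  unfold Spec_solve solve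
  by_cases hlen : s0.toList.length = s1.toList.length + 1
  · rw [if_neg (by omega)]
    rw [loop_eq s0.toList s1.toList s1.toList.length 0 (by omega) hlen rfl]
    simp only [List.drop_zero]
    rw [aRec_eq_delB s1.toList s0.toList hlen]
    rw [Bool.eq_iff_iff, delB_iff, alt_iff]
  · rw [if_pos hlen]
    have hno : solve_alt s0 s1 = false := by
      rw [Bool.eq_false_iff, Ne, alt_iff]
      rintro ⟨k, hk, heq⟩
      have h1 : (s0.toList.take k ++ s0.toList.drop (k + 1)).length = s0.toList.length - 1 := by
        rw [List.length_append, List.length_take, List.length_drop]; omega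
      rw [heq] at h1
      omega
    rw [hno]
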